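-- pv_equiv track=rewrite | github.com/Daham-Mustaf/semantic-policy-generation | evaluation/ground_truth_draft_generation/scripts/finalize_refined_ttl.py | clean_ttl_content
-- ===== SOURCE A (Python) =====
-- def clean_ttl_content(text: str) -> str:
--     cleaned_lines = []
--     previous_blank = False
--
--     for raw_line in text.splitlines():
--         line = raw_line.rstrip()
--         stripped = line.strip()
--
--         # Remove markdown fences and all full-line comments.
--         if not stripped:
--             if not previous_blank:
--                 cleaned_lines.append("")
--             previous_blank = True
--             continue
--         if stripped.startswith("#") or stripped.startswith("```"):
--             continue
--
--         cleaned_lines.append(line)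
--         previous_blank = False
--
--     cleaned = "\n".join(cleaned_lines).strip() + "\n"
--     return cleaned
-- ===== SOURCE B (Python) =====
-- from itertools import groupby
--
--
-- def clean_ttl_content(text: str) -> str:
--     # Pass 1: rstrip every line, drop full-line comments / markdown fences.
--     kept = [line for line in map(str.rstrip, text.splitlines())
--             if not line.strip().startswith(("#", "```"))]
--     # Pass 2: collapse each run of blank lines into a single blank line.
--     out = []
--     for is_blank, group in groupby(kept, key=lambda l: not l):
--         if is_blank:
--             out.append("")
--         else:
--             out.extend(group)
--     return "\n".join(out).strip() + "\n"
-- ===== Notes on version B (the rewrite author's own statement) =====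
-- stated objective: alternative
-- what changed: Replaces A's single stateful loop with a previous_blank flag by two stateless passes: a filtering comprehension that drops comment/fence lines, then an itertools.groupby pass that collapses each run of blank lines into one.
import Mathlib
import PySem

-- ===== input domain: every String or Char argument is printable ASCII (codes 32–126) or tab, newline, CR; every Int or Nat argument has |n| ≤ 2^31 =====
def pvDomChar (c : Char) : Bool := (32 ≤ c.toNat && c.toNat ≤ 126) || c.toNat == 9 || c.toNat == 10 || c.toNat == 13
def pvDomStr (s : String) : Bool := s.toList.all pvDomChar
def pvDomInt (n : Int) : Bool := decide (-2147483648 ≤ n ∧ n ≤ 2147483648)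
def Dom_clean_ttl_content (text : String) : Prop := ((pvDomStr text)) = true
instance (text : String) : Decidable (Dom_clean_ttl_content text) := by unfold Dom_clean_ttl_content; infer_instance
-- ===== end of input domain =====

-- B replaces A's single stateful previous_blank loop by two stateless passes
-- (filter comment/fence lines, then collapse each blank run via groupby); alternative decomposition, same cost.

-- ===== PORT A =====
-- A's for-loop as structural recursion over the same state (cleaned_lines, previous_blank)
def cleanLoopA : List String → List String → Bool → List String
  | [], acc, _ => acc
  | raw :: rest, acc, prev =>
    let line := PySem.Str.rstrip raw
    let stripped := PySem.Str.strip line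
    if stripped = "" then
      cleanLoopA rest (if prev then acc else acc ++ [""]) true
    else if PySem.Str.startswith stripped "#" || PySem.Str.startswith stripped "```" then
      cleanLoopA rest acc prev
    else
      cleanLoopA rest (acc ++ [line]) false

def clean_ttl_content (text : String) : String :=
  PySem.Str.strip (PySem.Str.join "\n" (cleanLoopA (PySem.Str.splitlines text) [] false)) ++ "\n"

-- ===== PORT B =====
-- B's comprehension filter, applied to the rstripped lines
def keepLine (line : String) : Bool :=
  !(PySem.Str.startswith (PySem.Str.strip line) "#" ||
    PySem.Str.startswith (PySem.Str.strip line) "```")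

-- B's groupby pass: one "" per run of blank lines, non-blank groups copied through
def collapseBlanks : List String → List String
  | [] => []
  | l :: rest =>
    if l = "" then "" :: collapseBlanks (List.dropWhile (· == "") rest)
    else l :: collapseBlanks rest
termination_by ls => ls.length
decreasing_by
  · have := List.length_dropWhile_le (fun s => s == "") rest
    simp only [List.length_cons]
    omega
  · simp only [List.length_cons]
    omega

def clean_ttl_content_alt (text : String) : String :=
  let kept := ((PySem.Str.splitlines text).map PySem.Str.rstrip).filter keepLine
  PySem.Str.strip (PySem.Str.join "\n" (collapseBlanks kept)) ++ "\n"

-- ===== PRECONDITION & SPEC =====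
def Spec_clean_ttl_content (text : String) (out : String) : Prop := out = clean_ttl_content_alt text
instance (text : String) (out : String) : Decidable (Spec_clean_ttl_content text out) := by unfold Spec_clean_ttl_content; infer_instance

-- ===== CLAIM (what is proved, stated in full; the proofs are below) =====
def Claim_equal_clean_ttl_content : Prop := ∀ (text : String), Dom_clean_ttl_content text → Spec_clean_ttl_content text (clean_ttl_content text)

-- ===== LEMMAS AND PROOFS =====

-- a dropWhile-result whose elements all satisfy p is empty
lemma dropWhile_eq_nil_of_all {α : Type} (p : α → Bool) (l : List α)
    (h : ∀ x ∈ List.dropWhile p l, p x = true) : List.dropWhile p l = [] := by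
  induction l with
  | nil => rfl
  | cons c t ih =>
    by_cases hc : p c = true
    · rw [List.dropWhile_cons_of_pos hc] at h ⊢
      exact ih h
    · rw [List.dropWhile_cons_of_neg hc] at h
      exact absurd (h c (by simp)) hc

lemma rstrip_eq_nil_iff (x : List Char) :
    PySem.Chars.rstrip x = [] ↔ ∀ c ∈ x, PySem.Chars.isspace c = true := by
  unfold PySem.Chars.rstrip
  rw [List.reverse_eq_nil_iff, List.dropWhile_eq_nil_iff]
  constructor <;> intro h c hc
  · exact h c (List.mem_reverse.mpr hc)
  · exact h c (List.mem_reverse.mp hc)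

lemma strip_nil_all_isspace (x : List Char) (h : PySem.Chars.strip x = []) :
    ∀ c ∈ x, PySem.Chars.isspace c = true := by
  unfold PySem.Chars.strip at h
  have h1 := (rstrip_eq_nil_iff _).mp h
  unfold PySem.Chars.lstrip at h1
  intro c hc
  rw [← List.takeWhile_append_dropWhile (p := PySem.Chars.isspace) (l := x)] at hc
  rcases List.mem_append.mp hc with h2 | h2
  · exact List.mem_takeWhile_imp h2
  · exact h1 c h2

lemma rstrip_nil_of_all (x : List Char)
    (h : ∀ c ∈ PySem.Chars.rstrip x, PySem.Chars.isspace c = true) :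
    PySem.Chars.rstrip x = [] := by
  unfold PySem.Chars.rstrip at h ⊢
  rw [List.reverse_eq_nil_iff]
  apply dropWhile_eq_nil_of_all
  intro c hc
  exact h c (List.mem_reverse.mpr hc)

-- a rstripped line is blank in Python's sense (`not line.strip()`) iff it is already ""
lemma strip_rstrip_eq_empty (raw : String)
    (h : PySem.Str.strip (PySem.Str.rstrip raw) = "") : PySem.Str.rstrip raw = "" := by
  have h' : PySem.Chars.strip (PySem.Chars.rstrip raw.toList) = [] := by
    have := congrArg String.toList h
    rwa [PySem.Str.toList_strip, PySem.Str.toList_rstrip] at this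
  have hall := strip_nil_all_isspace _ h'
  have hn : PySem.Chars.rstrip raw.toList = [] := rstrip_nil_of_all _ hall
  apply String.toList_inj.mp
  rw [PySem.Str.toList_rstrip, hn]
  rfl

-- step equations for A's loop
lemma cleanA_blank (raw : String) (rest acc : List String) (prev : Bool)
    (h : PySem.Str.strip (PySem.Str.rstrip raw) = "") :
    cleanLoopA (raw :: rest) acc prev =
      cleanLoopA rest (if prev then acc else acc ++ [""]) true := by
  simp only [cleanLoopA]
  rw [if_pos h]

lemma cleanA_comment (raw : String) (rest acc : List String) (prev : Bool)
    (h1 : ¬ PySem.Str.strip (PySem.Str.rstrip raw) = "")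
    (h2 : (PySem.Str.startswith (PySem.Str.strip (PySem.Str.rstrip raw)) "#" ||
           PySem.Str.startswith (PySem.Str.strip (PySem.Str.rstrip raw)) "```") = true) :
    cleanLoopA (raw :: rest) acc prev = cleanLoopA rest acc prev := by
  simp only [cleanLoopA]
  rw [if_neg h1, if_pos h2]

lemma cleanA_keep (raw : String) (rest acc : List String) (prev : Bool)
    (h1 : ¬ PySem.Str.strip (PySem.Str.rstrip raw) = "")
    (h2 : (PySem.Str.startswith (PySem.Str.strip (PySem.Str.rstrip raw)) "#" ||
           PySem.Str.startswith (PySem.Str.strip (PySem.Str.rstrip raw)) "```") = false) :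
    cleanLoopA (raw :: rest) acc prev =
      cleanLoopA rest (acc ++ [PySem.Str.rstrip raw]) false := by
  simp only [cleanLoopA]
  rw [if_neg h1, if_neg (by rw [h2]; decide)]

-- the filtered, rstripped list B works on
def keptOf (lines : List String) : List String :=
  (lines.map PySem.Str.rstrip).filter keepLine

-- prev = true means A is still swallowing a blank run
def tailFor (prev : Bool) (l : List String) : List String :=
  if prev then l.dropWhile (· == "") else l

-- loop invariant: A's stateful loop = acc ++ B's collapse of the filtered tail
lemma cleanLoopA_eq (lines : List String) :
    ∀ (acc : List String) (prev : Bool),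
      cleanLoopA lines acc prev = acc ++ collapseBlanks (tailFor prev (keptOf lines)) := by
  induction lines with
  | nil =>
    intro acc prev
    simp [cleanLoopA, keptOf, tailFor, collapseBlanks]
  | cons raw rest ih =>
    intro acc prev
    by_cases hb : PySem.Str.strip (PySem.Str.rstrip raw) = ""
    · -- blank line: kept by B's filter, and equal to "" itself
      have hline : PySem.Str.rstrip raw = "" := strip_rstrip_eq_empty raw hb
      have hkeep : keepLine "" = true := by
        unfold keepLine
        rw [show PySem.Str.strip "" = "" by decide]
        decide
      have hkept : keptOf (raw :: rest) = "" :: keptOf rest := by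
        simp [keptOf, hkeep, hline]
      rw [cleanA_blank raw rest acc prev hb, ih, hkept]
      cases prev with
      | true => simp [tailFor]
      | false => simp [tailFor, collapseBlanks]
    · by_cases hc : (PySem.Str.startswith (PySem.Str.strip (PySem.Str.rstrip raw)) "#" ||
          PySem.Str.startswith (PySem.Str.strip (PySem.Str.rstrip raw)) "```") = true
      · -- comment / fence line: skipped by A, dropped by B's filter
        have hkeep : keepLine (PySem.Str.rstrip raw) = false := by
          unfold keepLine
          rw [hc]
          rfl
        have hkept : keptOf (raw :: rest) = keptOf rest := by
          simp [keptOf, hkeep]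
        rw [cleanA_comment raw rest acc prev hb hc, ih, hkept]
      · -- content line
        have hc' : (PySem.Str.startswith (PySem.Str.strip (PySem.Str.rstrip raw)) "#" ||
            PySem.Str.startswith (PySem.Str.strip (PySem.Str.rstrip raw)) "```") = false :=
          Bool.eq_false_iff.mpr hc
        have hkeep : keepLine (PySem.Str.rstrip raw) = true := by
          unfold keepLine
          rw [hc']
          rfl
        have hne : PySem.Str.rstrip raw ≠ "" := by
          intro h
          exact hb (by rw [h]; decide)
        have hkept : keptOf (raw :: rest) = PySem.Str.rstrip raw :: keptOf rest := by
          simp [keptOf, hkeep]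
        rw [cleanA_keep raw rest acc prev hb hc', ih, hkept]
        cases prev with
        | true => simp [tailFor, hne, collapseBlanks]
        | false => simp [tailFor, collapseBlanks, hne]

-- ===== VERDICT (by name: the statement is the Claim_ definition above) =====
theorem clean_ttl_content_spec : Claim_equal_clean_ttl_content := by
  intro text _
  unfold Spec_clean_ttl_content clean_ttl_content clean_ttl_content_alt
  rw [cleanLoopA_eq (PySem.Str.splitlines text) [] false]
  simp [tailFor, keptOf]
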